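-- pv_equiv track=rewrite | github.com/npklein/metabrain | deconvolution/matrix_preparation/src/main.py | create_force_dict
-- ===== SOURCE A (Python) =====
-- def create_force_dict(force_steps):
--     force_dict = {'combine_gte_files': False, 'combine_eqtlprobes': False,
--                   'create_matrices': False, 'perform_celltype_pca': False,
--                   'create_deconvolution_matrices': False,
--                   'perform_deconvolution': False,
--                   'create_cov_matrix': False, 'mask_matrices': False,
--                   'create_groups': False, 'create_regression_matrix': False}
--     if force_steps is None or len(force_steps) == 0:
--         return force_dict
--
--     if force_steps == ['all']:
--         for key in force_dict.keys():
--             force_dict[key] = True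
--     else:
--         for step in force_steps:
--             if step in force_dict.keys():
--                 force_dict[step] = True
--
--     return force_dict
-- ===== SOURCE B (Python) =====
-- KEYS = ['combine_gte_files', 'combine_eqtlprobes', 'create_matrices',
--         'perform_celltype_pca', 'create_deconvolution_matrices',
--         'perform_deconvolution', 'create_cov_matrix', 'mask_matrices',
--         'create_groups', 'create_regression_matrix']
--
--
-- def _flags(keys, pred):
--     """Structural recursion over the key list: head entry, then the rest."""
--     if not keys:
--         return {}
--     return {keys[0]: pred(keys[0]), **_flags(keys[1:], pred)}
--
--
-- def create_force_dict(force_steps):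
--     if force_steps == ['all']:
--         pred = lambda k: True
--     elif not force_steps:
--         pred = lambda k: False
--     else:
--         wanted = frozenset(force_steps)
--         pred = wanted.__contains__
--     return _flags(KEYS, pred)
-- ===== Notes on version B (the rewrite author's own statement) =====
-- stated objective: alternative
-- what changed: Replaces A's build-default-dict-then-mutate loops by choosing a boolean predicate (constant true, constant false, or frozenset membership) and building the dict by structural recursion over the canonical key list, one entry per recursive step.
import Mathlib
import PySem

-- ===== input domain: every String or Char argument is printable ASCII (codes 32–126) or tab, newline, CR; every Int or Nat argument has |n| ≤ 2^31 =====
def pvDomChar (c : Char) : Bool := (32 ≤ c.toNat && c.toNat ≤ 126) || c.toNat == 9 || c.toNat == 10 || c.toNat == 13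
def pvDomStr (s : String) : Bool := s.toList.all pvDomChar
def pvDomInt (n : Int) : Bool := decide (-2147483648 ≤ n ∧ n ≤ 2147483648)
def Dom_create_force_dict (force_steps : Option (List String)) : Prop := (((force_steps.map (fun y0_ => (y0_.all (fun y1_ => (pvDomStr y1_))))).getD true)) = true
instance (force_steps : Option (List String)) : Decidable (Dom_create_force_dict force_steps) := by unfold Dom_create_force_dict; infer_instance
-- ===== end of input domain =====

-- B picks a boolean predicate (constant true / constant false / frozenset membership) and builds the
-- dict by structural recursion over the canonical key list; A builds a default-False dict and mutates it in loops.

-- ===== PORT A =====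
def pvForceDict0 : PySem.Dict String Bool :=
  PySem.Dict.ofList [("combine_gte_files", false), ("combine_eqtlprobes", false),
    ("create_matrices", false), ("perform_celltype_pca", false),
    ("create_deconvolution_matrices", false), ("perform_deconvolution", false),
    ("create_cov_matrix", false), ("mask_matrices", false),
    ("create_groups", false), ("create_regression_matrix", false)]

def create_force_dict (force_steps : Option (List String)) : List (String × Bool) :=
  let force_dict := pvForceDict0
  match force_steps with
  | none => force_dict.items
  | some fs =>
    if fs.length = 0 then force_dict.items
    else if fs = ["all"] then
      (force_dict.keys.foldl (fun d key => d.insert key true) force_dict).items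
    else
      (fs.foldl (fun d step => if d.keys.contains step then d.insert step true else d) force_dict).items

-- ===== PORT B =====
def pvKeys : List String :=
  ["combine_gte_files", "combine_eqtlprobes", "create_matrices",
   "perform_celltype_pca", "create_deconvolution_matrices",
   "perform_deconvolution", "create_cov_matrix", "mask_matrices",
   "create_groups", "create_regression_matrix"]

-- _flags in Source B: the keys are pairwise distinct, so `{keys[0]: pred(keys[0]), **rest}` is exactly a cons.
def pvFlags (keys : List String) (pred : String → Bool) : List (String × Bool) :=
  match keys with
  | [] => []
  | k :: rest => (k, pred k) :: pvFlags rest pred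

def create_force_dict_alt (force_steps : Option (List String)) : List (String × Bool) :=
  let pred : String → Bool :=
    if force_steps = some ["all"] then fun _ => true
    else
      match force_steps with
      | none => fun _ => false
      | some [] => fun _ => false
      | some l => fun k => PySem.Set.contains (PySem.Set.ofList l) k
  pvFlags pvKeys pred

-- ===== PRECONDITION & SPEC =====
def Spec_create_force_dict (force_steps : Option (List String)) (out : List (String × Bool)) : Prop := out = create_force_dict_alt force_steps
instance (force_steps : Option (List String)) (out : List (String × Bool)) : Decidable (Spec_create_force_dict force_steps out) := by unfold Spec_create_force_dict; infer_instance

-- ===== CLAIM (what is proved, stated in full; the proofs are below) =====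
def Claim_equal_create_force_dict : Prop := ∀ (force_steps : Option (List String)), Dom_create_force_dict force_steps → Spec_create_force_dict force_steps (create_force_dict force_steps)

-- ===== LEMMAS AND PROOFS =====

theorem pvFlags_eq_map (keys : List String) (pred : String → Bool) :
    pvFlags keys pred = keys.map (fun k => (k, pred k)) := by
  induction keys with
  | nil => rfl
  | cons k rest ih => simp [pvFlags, ih]

-- A's insert-if-member loop over `fs`, started from any dict shaped as a map over pvKeys,
-- yields the map with each key's flag OR'd with membership in `fs`.
theorem pvFold_items (fs : List String) (g : String → Bool) :
    (fs.foldl (fun d step => if d.keys.contains step then d.insert step true else d)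
      (PySem.Dict.mk (pvKeys.map (fun k => (k, g k))))).items
    = pvKeys.map (fun k => (k, g k || fs.contains k)) := by
  induction fs generalizing g with
  | nil => simp
  | cons s rest ih =>
    simp only [List.foldl_cons]
    have hkeys : (PySem.Dict.mk (pvKeys.map (fun k => (k, g k)))).keys = pvKeys := by
      simp [PySem.Dict.keys, List.map_map, Function.comp_def]
    by_cases hs : s ∈ pvKeys
    · have hc : (PySem.Dict.mk (pvKeys.map (fun k => (k, g k)))).keys.contains s = true := by
        rw [hkeys]; simpa using hs
      rw [hc, if_pos rfl]
      have hins : (PySem.Dict.mk (pvKeys.map (fun k => (k, g k)))).insert s true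
          = PySem.Dict.mk (pvKeys.map (fun k => (k, if k = s then true else g k))) := by
        have hcon : (PySem.Dict.mk (pvKeys.map (fun k => (k, g k)))).contains s = true := by
          rw [PySem.Dict.contains_eq_decide_mem_keys, hkeys]; simpa using hs
        apply PySem.Dict.ext
        simp only [PySem.Dict.items_insert, hcon, if_true]
        simp only [List.map_map]
        apply List.map_congr_left
        intro k _
        by_cases hks : k = s <;> simp [hks]
      rw [hins, ih]
      apply List.map_congr_left
      intro k _
      by_cases hks : k = s <;> simp [hks]
    · have hc : (PySem.Dict.mk (pvKeys.map (fun k => (k, g k)))).keys.contains s = false := by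
        rw [hkeys]; simpa using hs
      rw [hc]
      simp only [Bool.false_eq_true, if_false]
      rw [ih]
      apply List.map_congr_left
      intro k hk
      have : k ≠ s := fun h => hs (h ▸ hk)
      simp [this]

theorem pvForceDict0_eq : pvForceDict0 = PySem.Dict.mk (pvKeys.map (fun k => (k, false))) := by
  decide

-- ===== VERDICT (by name: the statement is the Claim_ definition above) =====
theorem create_force_dict_spec : Claim_equal_create_force_dict := by
  intro fs _
  unfold Spec_create_force_dict
  match fs with
  | none => decide
  | some l =>
    match l with
    | [] => decide
    | a :: l' =>
      by_cases hall : a :: l' = ["all"]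
      · rw [hall]; decide
      · show create_force_dict (some (a :: l')) = create_force_dict_alt (some (a :: l'))
        unfold create_force_dict create_force_dict_alt
        have hsome : ¬ (some (a :: l') = some ["all"]) := by simpa using hall
        simp only [List.length_cons, Nat.succ_ne_zero, if_false, hall, hsome]
        rw [pvForceDict0_eq, pvFold_items, pvFlags_eq_map]
        apply List.map_congr_left
        intro k hk
        simp [PySem.Set.contains]
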